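-- pv_equiv track=rewrite | github.com/GalaxyXieyu/Awesome-Langgraph-Learn | backup/Interactive-Deep-Reasearch/writer/core.py | _extract_agent_name
-- ===== SOURCE A (Python) =====
-- def _extract_agent_name(subgraph_ids: tuple) -> str:
--     """从subgraph_ids中提取最具体的agent名称"""
--     if not isinstance(subgraph_ids, tuple) or not subgraph_ids:
--         return "unknown"
--
--     agent_names = []
--     # 从tuple中提取所有agent名称，建立层级
--     # 格式如: ('content_creation:xxx', 'writing:yyy') → ['content_creation', 'writing']
--     for subgraph_id in subgraph_ids:
--         if isinstance(subgraph_id, str) and ':' in subgraph_id: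
--             parts = subgraph_id.split(':')
--             if len(parts) >= 2:
--                 agent_name = parts[0]  # 取冒号前的部分
--                 # 验证是否为已知的agent类型
--                 if agent_name in ['research', 'writing', 'content_creation', 'tools', 'intelligent_supervisor']:
--                     agent_names.append(agent_name)
--
--     # 返回最后一个（最具体的）agent，例如writing比content_creation更具体
--     return agent_names[-1] if agent_names else "unknown"
-- ===== SOURCE B (Python) =====
-- _KNOWN = frozenset(['research', 'writing', 'content_creation', 'tools', 'intelligent_supervisor'])
--
--
-- def _extract_agent_name(subgraph_ids: tuple) -> str:
--     """Return the most specific (last) known agent name found in subgraph_ids."""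
--     if not isinstance(subgraph_ids, tuple) or not subgraph_ids:
--         return "unknown"
--     # scan from the end: the first hit is the last (most specific) agent
--     for sid in reversed(subgraph_ids):
--         if isinstance(sid, str):
--             parts = sid.split(':')
--             if len(parts) >= 2 and parts[0] in _KNOWN:
--                 return parts[0]
--     return "unknown"
-- ===== Notes on version B (the rewrite author's own statement) =====
-- stated objective: simpler
-- what changed: B replaces A's build-a-list-of-all-matching-agent-names-then-index-[-1] pass by a reverse scan that returns the first (i.e. last-in-order) element whose part before ':' is a known agent, short-circuiting; the ':' membership test is dropped since len(split)>=2 implies it.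
import Mathlib
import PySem

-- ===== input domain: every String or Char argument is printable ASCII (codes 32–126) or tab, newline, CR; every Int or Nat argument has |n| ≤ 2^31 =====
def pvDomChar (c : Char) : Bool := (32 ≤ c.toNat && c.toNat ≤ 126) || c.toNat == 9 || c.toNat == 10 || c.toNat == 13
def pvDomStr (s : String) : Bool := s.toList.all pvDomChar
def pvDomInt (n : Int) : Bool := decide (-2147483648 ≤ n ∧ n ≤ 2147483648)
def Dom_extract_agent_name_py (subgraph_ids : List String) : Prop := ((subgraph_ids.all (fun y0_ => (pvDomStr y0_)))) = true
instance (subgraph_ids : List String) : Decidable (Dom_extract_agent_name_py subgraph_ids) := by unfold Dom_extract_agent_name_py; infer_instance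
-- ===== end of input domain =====

-- B replaces A's accumulate-all-then-take-last pass by a reverse scan that
-- returns the first (i.e. last-in-order, most specific) known agent name
-- directly; equivalence of return values is proved on all inputs.

-- the known agent types (shared literal constant of both ports)
def knownAgents : List String :=
  ["research", "writing", "content_creation", "tools", "intelligent_supervisor"]

-- ===== PORT A =====
def extract_agent_name_py (subgraph_ids : List String) : String :=
  -- `not isinstance(..., tuple)` is always false for a tuple argument
  if subgraph_ids.isEmpty then "unknown"
  else
    let agent_names : List String :=
      subgraph_ids.foldl (fun acc subgraph_id =>
        if PySem.Str.isIn ":" subgraph_id then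
          let parts := (PySem.Str.split? subgraph_id ":").getD []
          if 2 ≤ parts.length then
            let agent_name := parts.headD ""   -- parts[0]; parts ≠ [] here
            if agent_name ∈ knownAgents then acc ++ [agent_name] else acc
          else acc
        else acc) []
    match agent_names.getLast? with            -- agent_names[-1] if agent_names else "unknown"
    | some n => n
    | none => "unknown"

-- ===== PORT B =====
def extractAgentGo : List String → String
  | [] => "unknown"
  | sid :: rest =>
    let parts := (PySem.Str.split? sid ":").getD []
    if 2 ≤ parts.length ∧ parts.headD "" ∈ knownAgents then parts.headD ""
    else extractAgentGo rest

def extract_agent_name_py_alt (subgraph_ids : List String) : String :=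
  if subgraph_ids.isEmpty then "unknown"
  else extractAgentGo subgraph_ids.reverse

-- ===== PRECONDITION & SPEC =====
def Spec_extract_agent_name_py (subgraph_ids : List String) (out : String) : Prop := out = extract_agent_name_py_alt subgraph_ids
instance (subgraph_ids : List String) (out : String) : Decidable (Spec_extract_agent_name_py subgraph_ids out) := by unfold Spec_extract_agent_name_py; infer_instance

-- ===== CLAIM (what is proved, stated in full; the proofs are below) =====
def Claim_equal_extract_agent_name_py : Prop := ∀ (subgraph_ids : List String), Dom_extract_agent_name_py subgraph_ids → Spec_extract_agent_name_py subgraph_ids (extract_agent_name_py subgraph_ids)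

-- ===== LEMMAS AND PROOFS =====

-- the per-element extraction both ports perform, as an Option
def pickAgent (sid : String) : Option String :=
  let parts := (PySem.Str.split? sid ":").getD []
  if 2 ≤ parts.length ∧ parts.headD "" ∈ knownAgents then some (parts.headD "") else none

theorem splitOnGo_no_match (sep : List Char) : ∀ (fuel : Nat) (l cur : List Char) (acc : List (List Char)),
    ¬ sep <:+: l → PySem.Chars.splitOn.go sep fuel l cur acc = acc.reverse ++ [cur.reverse ++ l] := by
  intro fuel
  induction fuel with
  | zero => intro l cur acc h; simp [PySem.Chars.splitOn.go]
  | succ n ih =>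
    intro l cur acc h
    match l with
    | [] => simp [PySem.Chars.splitOn.go]
    | c :: rest =>
      rw [PySem.Chars.splitOn.go]
      have hp : sep.isPrefixOf (c :: rest) = false := by
        by_contra hc
        exact h ((List.isPrefixOf_iff_prefix.mp (by simpa using hc)).isInfix)
      simp only [hp, Bool.false_eq_true, if_false]
      rw [ih rest (c :: cur) acc (fun hi => h (hi.trans (List.suffix_cons c rest).isInfix))]
      simp

theorem splitOn_no_match (s sep : List Char) (h : ¬ sep <:+: s) :
    PySem.Chars.splitOn s sep = [s] := by
  rw [PySem.Chars.splitOn, splitOnGo_no_match sep _ s [] [] h]; simp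

-- when ':' does not occur in sid, split gives the single piece [sid]
theorem parts_of_not_isIn (sid : String) (h : PySem.Str.isIn ":" sid = false) :
    (PySem.Str.split? sid ":").getD [] = [String.ofList sid.toList] := by
  have hinf : ¬ (([':'] : List Char) <:+: sid.toList) := by
    rw [PySem.Str.isIn_eq] at h
    simpa using (PySem.Chars.isIn_eq_false_iff _ _).mp h
  rw [PySem.Str.split?, PySem.Chars.split?]
  simp [splitOn_no_match _ _ hinf, String.ofList]

-- A's loop body, expressed through pickAgent
theorem step_eq_pick (acc : List String) (sid : String) :
    (if PySem.Str.isIn ":" sid then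
       let parts := (PySem.Str.split? sid ":").getD []
       if 2 ≤ parts.length then
         let agent_name := parts.headD ""
         if agent_name ∈ knownAgents then acc ++ [agent_name] else acc
       else acc
     else acc)
    = acc ++ (pickAgent sid).toList := by
  by_cases hin : PySem.Str.isIn ":" sid
  · simp only [hin, if_true, pickAgent]
    split_ifs with h1 h2 h3 <;> simp_all
  · simp only [Bool.not_eq_true] at hin
    simp only [hin, Bool.false_eq_true, if_false, pickAgent,
      parts_of_not_isIn sid hin]
    simp

theorem foldA_eq (ids : List String) : ∀ (acc : List String),
    ids.foldl (fun acc subgraph_id =>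
        if PySem.Str.isIn ":" subgraph_id then
          let parts := (PySem.Str.split? subgraph_id ":").getD []
          if 2 ≤ parts.length then
            let agent_name := parts.headD ""
            if agent_name ∈ knownAgents then acc ++ [agent_name] else acc
          else acc
        else acc) acc
    = acc ++ ids.filterMap pickAgent := by
  induction ids with
  | nil => simp
  | cons sid rest ih =>
    intro acc
    simp only [List.foldl_cons]
    rw [step_eq_pick acc sid] at *
    rw [ih (acc ++ (pickAgent sid).toList)]
    cases h : pickAgent sid <;> simp [h]

theorem extractAgentGo_eq (l : List String) :
    extractAgentGo l = (l.filterMap pickAgent).headD "unknown" := by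
  induction l with
  | nil => simp [extractAgentGo]
  | cons sid rest ih =>
    simp only [extractAgentGo]
    by_cases h : 2 ≤ ((PySem.Str.split? sid ":").getD []).length ∧
        ((PySem.Str.split? sid ":").getD []).headD "" ∈ knownAgents
    · rw [if_pos h, List.filterMap_cons]
      have hp : pickAgent sid = some (((PySem.Str.split? sid ":").getD []).headD "") := by
        simp only [pickAgent]; rw [if_pos h]
      rw [hp, List.headD_cons]
    · rw [if_neg h, List.filterMap_cons]
      have hp : pickAgent sid = none := by simp only [pickAgent]; rw [if_neg h]
      rw [hp]; exact ih

-- ===== VERDICT (by name: the statement is the Claim_ definition above) =====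
theorem extract_agent_name_py_spec : Claim_equal_extract_agent_name_py := by
  intro ids _
  unfold Spec_extract_agent_name_py extract_agent_name_py extract_agent_name_py_alt
  by_cases hne : ids.isEmpty
  · simp [hne]
  · simp only [hne, Bool.false_eq_true, if_false]
    rw [foldA_eq ids [], extractAgentGo_eq, List.nil_append,
      List.filterMap_reverse, List.headD_eq_head?, List.head?_reverse]
    cases h : (ids.filterMap pickAgent).getLast? <;> simp
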